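-- pv_equiv track=rewrite | github.com/Zim95/DSA | hackerrank_solutions/algorithms/graph_theory/journey_to_the_moon.py | journeyToMoon
-- ===== SOURCE A (Python) =====
-- def dfs(node_id, graph, visited, connected_comps):
--     connections = graph[node_id]
--     for connection in connections:
--         if visited[connection]:
--             continue
--         else:
--             visited[connection] = True
--             c, v = dfs(connection, graph, visited, connected_comps)
--             connected_comps = c
--             visited = v
--     connected_comps.append(node_id)
--     return connected_comps, visited
--
-- def get_possible_ways(connected_groups):
--     total = 0
--     result = 0
--     for size in connected_groups:
--         result += size * total
--         total += size
--     return result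
--
-- def journeyToMoon(n, astronaut):
--     graph = {}
--     visited = {}
--
--     # create graph and visited
--     for i in range(0, n):
--         graph[i] = []
--         visited[i] = False
--
--     # add the edges
--     for astro_pair in astronaut:
--         graph[astro_pair[0]].append(astro_pair[1])
--         graph[astro_pair[1]].append(astro_pair[0])
--
--     connected_groups = []
--     for node_id, connections in graph.items():
--         if visited[node_id]:
--             continue
--         if not connections:
--             connected_groups.append(1)
--             continue
--         visited[node_id] = True
--         connected_group, v = dfs(node_id, graph, visited, [])
--         visited = v
--         connected_groups.append(len(connected_group))
--     possible_ways = get_possible_ways(connected_groups)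
--     return possible_ways
-- ===== SOURCE B (Python) =====
-- def journeyToMoon(n, astronaut):
--     # weighted quick-find: label[node] -> component label, members[label] -> node list
--     label = {i: i for i in range(0, n)}
--     members = {i: [i] for i in range(0, n)}
--     for pair in astronaut:
--         a = label[pair[0]]
--         b = label[pair[1]]
--         if a != b:
--             if len(members[a]) > len(members[b]):
--                 a, b = b, a
--             for k in members[a]:
--                 label[k] = b
--             members[b].extend(members[a])
--             del members[a]
--     total = 0
--     sq = 0
--     for group in members.values():
--         total += len(group)
--         sq += len(group) * len(group)
--     return (total * total - sq) // 2
-- ===== Notes on version B (the rewrite author's own statement) =====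
-- stated objective: alternative
-- what changed: Replaced A's recursive DFS component enumeration plus running pair accumulator by a weighted quick-find (union-find) over the astronaut edges, reading off component sizes from the disjoint-set member lists and computing the pair count by the closed form (total^2 - sum of squared sizes) // 2.
import Mathlib
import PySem

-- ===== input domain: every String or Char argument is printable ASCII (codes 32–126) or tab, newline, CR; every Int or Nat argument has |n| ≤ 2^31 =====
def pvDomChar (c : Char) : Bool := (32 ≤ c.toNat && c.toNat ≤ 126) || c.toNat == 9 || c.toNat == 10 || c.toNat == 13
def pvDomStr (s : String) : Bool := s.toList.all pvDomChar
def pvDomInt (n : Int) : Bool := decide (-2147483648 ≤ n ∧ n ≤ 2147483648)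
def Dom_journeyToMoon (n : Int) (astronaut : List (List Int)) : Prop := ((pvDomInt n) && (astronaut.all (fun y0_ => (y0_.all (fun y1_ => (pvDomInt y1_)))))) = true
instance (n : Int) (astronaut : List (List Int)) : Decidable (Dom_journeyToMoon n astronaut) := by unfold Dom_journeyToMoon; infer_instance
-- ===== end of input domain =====

-- B replaces A's recursive DFS component search by a weighted quick-find (union-find)
-- over the astronaut edges and a closed-form pair count (total² - Σ size²)/2; objective: alternative.

-- ===== PORT A =====
-- helper `dfs` of A, ported with a fuel argument (recursion depth is bounded by the
-- number of nodes, so fuel n.toNat + 1 never runs out on inputs admitted by Pre_).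
def dfsA (fuel : Nat) (nodeId : Int) (graph : PySem.Dict Int (List Int))
    (visited : PySem.Dict Int Bool) (acc : List Int) : List Int × PySem.Dict Int Bool :=
  match fuel with
  | 0 => (acc, visited)
  | Nat.succ f =>
    let connections := graph.getD nodeId []
    let st := connections.foldl
      (fun (st : List Int × PySem.Dict Int Bool) c =>
        if st.2.getD c false = true then st
        else dfsA f c graph (st.2.insert c true) st.1) (acc, visited)
    (st.1 ++ [nodeId], st.2)

-- helper `get_possible_ways` of A
def getPossibleWaysA (connectedGroups : List Int) : Int :=
  (connectedGroups.foldl (fun (tr : Int × Int) size => (tr.1 + size, tr.2 + size * tr.1)) (0, 0)).2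

def journeyToMoon (n : Int) (astronaut : List (List Int)) : Int :=
  let gv := (PySem.List.pyRange 0 n 1).foldl
    (fun (gv : PySem.Dict Int (List Int) × PySem.Dict Int Bool) i =>
      (gv.1.insert i [], gv.2.insert i false)) (PySem.Dict.empty, PySem.Dict.empty)
  let graph := astronaut.foldl
    (fun g p =>
      ((g.modify ((PySem.List.pyGet? p 0).getD 0) [] (fun l => l ++ [(PySem.List.pyGet? p 1).getD 0])).modify
        ((PySem.List.pyGet? p 1).getD 0) [] (fun l => l ++ [(PySem.List.pyGet? p 0).getD 0]))) gv.1
  let st := graph.items.foldl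
    (fun (st : PySem.Dict Int Bool × List Int) kv =>
      if st.1.getD kv.1 false = true then st
      else if kv.2 = [] then (st.1, st.2 ++ [(1 : Int)])
      else
        let r := dfsA (n.toNat + 1) kv.1 graph (st.1.insert kv.1 true) []
        (r.2, st.2 ++ [((r.1.length : Int))])) (gv.2, [])
  getPossibleWaysA st.2

-- ===== PORT B =====
def journeyToMoon_alt (n : Int) (astronaut : List (List Int)) : Int :=
  let label : PySem.Dict Int Int :=
    (PySem.List.pyRange 0 n 1).foldl (fun d i => d.insert i i) PySem.Dict.empty
  let members : PySem.Dict Int (List Int) :=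
    (PySem.List.pyRange 0 n 1).foldl (fun d i => d.insert i [i]) PySem.Dict.empty
  let st := astronaut.foldl
    (fun (st : PySem.Dict Int Int × PySem.Dict Int (List Int)) p =>
      let a := st.1.getD ((PySem.List.pyGet? p 0).getD 0) 0
      let b := st.1.getD ((PySem.List.pyGet? p 1).getD 0) 0
      if a ≠ b then
        let ab := if (st.2.getD a []).length > (st.2.getD b []).length then (b, a) else (a, b)
        let label' := (st.2.getD ab.1 []).foldl (fun l k => l.insert k ab.2) st.1
        let members' := (st.2.modify ab.2 [] (fun l => l ++ st.2.getD ab.1 [])).erase ab.1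
        (label', members')
      else st) (label, members)
  let ts := st.2.values.foldl
    (fun (ts : Int × Int) g => (ts.1 + (g.length : Int), ts.2 + (g.length : Int) * (g.length : Int))) (0, 0)
  PySem.Int.floordiv (ts.1 * ts.1 - ts.2) 2

-- ===== PRECONDITION & SPEC =====
-- Pre_ excludes exactly the inputs where Python A raises (IndexError on an astronaut
-- pair with fewer than two entries, KeyError on an endpoint outside range(n)).
def Pre_journeyToMoon (n : Int) (astronaut : List (List Int)) : Prop :=
  ∀ p ∈ astronaut, 2 ≤ p.length ∧
    0 ≤ p.getD 0 0 ∧ p.getD 0 0 < n ∧ 0 ≤ p.getD 1 0 ∧ p.getD 1 0 < n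

instance (n : Int) (astronaut : List (List Int)) : Decidable (Pre_journeyToMoon n astronaut) := by
  unfold Pre_journeyToMoon; infer_instance

def pvWitness_journeyToMoon : Int × List (List Int) := (5, [[0, 1], [2, 3], [0, 4]])

def Spec_journeyToMoon (n : Int) (astronaut : List (List Int)) (out : Int) : Prop :=
  out = journeyToMoon_alt n astronaut
instance (n : Int) (astronaut : List (List Int)) (out : Int) : Decidable (Spec_journeyToMoon n astronaut out) := by
  unfold Spec_journeyToMoon; infer_instance

-- ===== CLAIM (what is proved, stated in full; the proofs are below) =====
def Claim_equal_journeyToMoon : Prop := ∀ (n : Int) (astronaut : List (List Int)), Dom_journeyToMoon n astronaut → Pre_journeyToMoon n astronaut → Spec_journeyToMoon n astronaut (journeyToMoon n astronaut)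

-- ===== LEMMAS AND PROOFS =====


-- ---------- basic abstractions ----------

def nodesOf (n : Int) : List Int := PySem.List.pyRange 0 n 1
def fstP (p : List Int) : Int := (PySem.List.pyGet? p 0).getD 0
def sndP (p : List Int) : Int := (PySem.List.pyGet? p 1).getD 0
def edgesOf (astronaut : List (List Int)) : List (Int × Int) :=
  astronaut.map (fun p => (fstP p, sndP p))

def er (E : List (Int × Int)) (x y : Int) : Prop := (x, y) ∈ E ∨ (y, x) ∈ E
def conn (E : List (Int × Int)) : Int → Int → Prop := Relation.ReflTransGen (er E)

lemma er_symm (E : List (Int × Int)) {x y : Int} (h : er E x y) : er E y x := h.elim Or.inr Or.inl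

lemma conn_refl (E : List (Int × Int)) (x : Int) : conn E x x := Relation.ReflTransGen.refl

lemma conn_symm (E : List (Int × Int)) {x y : Int} (h : conn E x y) : conn E y x :=
  Relation.ReflTransGen.symmetric (fun _ _ hh => er_symm E hh) h

lemma conn_single (E : List (Int × Int)) {x y : Int} (h : er E x y) : conn E x y :=
  Relation.ReflTransGen.single h

lemma er_snoc {E : List (Int × Int)} {a b x y : Int} :
    er (E ++ [(a, b)]) x y ↔ er E x y ∨ (x = a ∧ y = b) ∨ (x = b ∧ y = a) := by
  simp only [er, List.mem_append, List.mem_singleton, Prod.mk.injEq]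
  tauto

lemma conn_snoc {E : List (Int × Int)} {a b u v : Int} :
    conn (E ++ [(a, b)]) u v ↔
      conn E u v ∨ (conn E u a ∧ conn E b v) ∨ (conn E u b ∧ conn E a v) := by
  constructor
  · intro h
    induction h with
    | refl => exact Or.inl (conn_refl E u)
    | tail _ step ih =>
      rcases er_snoc.1 step with hee | ⟨rfl, rfl⟩ | ⟨rfl, rfl⟩
      · rcases ih with h1 | ⟨h1, h2⟩ | ⟨h1, h2⟩
        · exact Or.inl (h1.tail hee)
        · exact Or.inr (Or.inl ⟨h1, h2.tail hee⟩)
        · exact Or.inr (Or.inr ⟨h1, h2.tail hee⟩)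
      · rcases ih with h1 | ⟨h1, h2⟩ | ⟨h1, h2⟩
        · exact Or.inr (Or.inl ⟨h1, conn_refl E _⟩)
        · exact Or.inr (Or.inl ⟨h1, conn_refl E _⟩)
        · exact Or.inl h1
      · rcases ih with h1 | ⟨h1, h2⟩ | ⟨h1, h2⟩
        · exact Or.inr (Or.inr ⟨h1, conn_refl E _⟩)
        · exact Or.inl h1
        · exact Or.inr (Or.inr ⟨h1, conn_refl E _⟩)
  · have hmono : ∀ {x y : Int}, conn E x y → conn (E ++ [(a, b)]) x y :=
      fun h => Relation.ReflTransGen.mono (fun _ _ hh => er_snoc.2 (Or.inl hh)) h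
    have hab : conn (E ++ [(a, b)]) a b :=
      conn_single _ (er_snoc.2 (Or.inr (Or.inl ⟨rfl, rfl⟩)))
    rintro (h | ⟨h1, h2⟩ | ⟨h1, h2⟩)
    · exact hmono h
    · exact ((hmono h1).trans hab).trans (hmono h2)
    · exact ((hmono h1).trans (conn_symm _ hab)).trans (hmono h2)

lemma conn_snoc_of_conn {E : List (Int × Int)} {a b u v : Int} (hab : conn E a b) :
    conn (E ++ [(a, b)]) u v ↔ conn E u v := by
  rw [conn_snoc]
  constructor
  · rintro (h | ⟨h1, h2⟩ | ⟨h1, h2⟩)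
    · exact h
    · exact (h1.trans hab).trans h2
    · exact (h1.trans (conn_symm E hab)).trans h2
  · exact Or.inl

lemma conn_mem_of_ne {E : List (Int × Int)} {x y : Int} (h : conn E x y) (hne : y ≠ x) :
    ∃ z, er E y z := by
  rcases Relation.ReflTransGen.cases_tail h with h1 | ⟨c, _, hc⟩
  · exact absurd h1 hne
  · exact ⟨c, er_symm E hc⟩

-- ---------- generic list lemmas ----------

lemma countP_congr_mem {l : List Int} {p q : Int → Bool}
    (h : ∀ y ∈ l, p y = q y) : l.countP p = l.countP q :=
  List.countP_congr (fun x hx => by rw [h x hx])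

lemma countP_update {l : List Int} {p q : Int → Bool} {x : Int} (hl : l.Nodup) (hx : x ∈ l)
    (hagree : ∀ y, y ≠ x → p y = q y) (hpx : p x = false) (hqx : q x = true) :
    l.countP q = l.countP p + 1 := by
  induction l with
  | nil => cases hx
  | cons a l ih =>
    rcases List.nodup_cons.1 hl with ⟨hna, hnd⟩
    rcases List.mem_cons.1 hx with rfl | hx'
    · have : l.countP p = l.countP q :=
        countP_congr_mem (fun y hy => hagree y (fun hyx => hna (hyx ▸ hy)))
      simp [List.countP_cons, hpx, hqx, this]
    · have hax : a ≠ x := fun h => hna (h ▸ hx')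
      rw [List.countP_cons, List.countP_cons, ih hnd hx', hagree a hax]
      ring

lemma countP_or_disjoint {l : List Int} {p q : Int → Bool}
    (hdisj : ∀ y ∈ l, ¬(p y = true ∧ q y = true)) :
    l.countP (fun y => p y || q y) = l.countP p + l.countP q := by
  induction l with
  | nil => simp
  | cons a l ih =>
    have ih' := ih (fun y hy => hdisj y (List.mem_cons_of_mem a hy))
    have ha := hdisj a (List.mem_cons_self)
    cases hpa : p a <;> cases hqa : q a
    · simp [List.countP_cons, hpa, hqa, ih']; try omega
    · simp [List.countP_cons, hpa, hqa, ih']; try omega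
    · simp [List.countP_cons, hpa, hqa, ih']; try omega
    · exact absurd ⟨hpa, hqa⟩ ha

lemma sum_filter_or_disjoint {l : List Int} {p q : Int → Bool} (f : Int → Int)
    (hdisj : ∀ y ∈ l, ¬(p y = true ∧ q y = true)) :
    ((l.filter (fun y => p y || q y)).map f).sum
      = ((l.filter p).map f).sum + ((l.filter q).map f).sum := by
  induction l with
  | nil => simp
  | cons a l ih =>
    have ih' := ih (fun y hy => hdisj y (List.mem_cons_of_mem a hy))
    have ha := hdisj a (List.mem_cons_self)
    cases hpa : p a <;> cases hqa : q a
    · simp [List.filter_cons, hpa, hqa, ih']; try ring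
    · simp [List.filter_cons, hpa, hqa, ih']; try ring
    · simp [List.filter_cons, hpa, hqa, ih']; try ring
    · exact absurd ⟨hpa, hqa⟩ ha

lemma sum_map_filter_const {l : List Int} {p : Int → Bool} {f : Int → Int} {c : Int}
    (h : ∀ y ∈ l, p y = true → f y = c) :
    ((l.filter p).map f).sum = (l.countP p : Int) * c := by
  induction l with
  | nil => simp
  | cons a l ih =>
    have ih' := ih (fun y hy => h y (List.mem_cons_of_mem a hy))
    rw [List.filter_cons, List.countP_cons]
    cases hpa : p a
    · simpa [List.filter_cons, List.countP_cons, hpa] using ih'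
    · simp [List.filter_cons, List.countP_cons, hpa, ih', h a List.mem_cons_self hpa]
      push_cast
      ring

lemma sum_indicator {ks : List Int} (hnd : ks.Nodup) {t : Int} (ht : t ∈ ks) (f : Int → Int) :
    (ks.map (fun ℓ => if t = ℓ then f ℓ else 0)).sum = f t := by
  induction ks with
  | nil => cases ht
  | cons a ks ih =>
    rcases List.nodup_cons.1 hnd with ⟨hna, hnd'⟩
    by_cases hta : t = a
    · subst hta
      have hz : (ks.map (fun ℓ => if t = ℓ then f ℓ else 0)).sum = 0 := by
        apply List.sum_eq_zero
        intro x hx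
        rcases List.mem_map.1 hx with ⟨ℓ, hℓ, rfl⟩
        have hne : ¬ (t = ℓ) := by intro h; subst h; exact hna hℓ
        rw [if_neg hne]
      simp [hz]
    · have ht' : t ∈ ks := (List.mem_cons.1 ht).resolve_left hta
      simp [hta, ih hnd' ht']

lemma sum_counts {ks : List Int} (hnd : ks.Nodup) (lb : Int → Int) (f : Int → Int) :
    ∀ {l : List Int}, (∀ x ∈ l, lb x ∈ ks) →
    (ks.map (fun ℓ => (l.countP (fun w => lb w == ℓ) : Int) * f ℓ)).sum
      = (l.map (fun x => f (lb x))).sum := by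
  intro l
  induction l with
  | nil => simp
  | cons x l ih =>
    intro hcov
    have ih' := ih (fun y hy => hcov y (List.mem_cons_of_mem x hy))
    have hx := hcov x List.mem_cons_self
    calc (ks.map (fun ℓ => ((List.countP (fun w => lb w == ℓ) (x :: l) : Int)) * f ℓ)).sum
        = (ks.map (fun ℓ => (l.countP (fun w => lb w == ℓ) : Int) * f ℓ
            + if lb x = ℓ then f ℓ else 0)).sum := by
          refine congrArg List.sum (List.map_congr_left ?_)
          intro ℓ _
          rw [List.countP_cons]
          by_cases hxe : lb x = ℓ
          · simp [hxe]; push_cast; ring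
          · simp [hxe]
      _ = (ks.map (fun ℓ => (l.countP (fun w => lb w == ℓ) : Int) * f ℓ)).sum
            + (ks.map (fun ℓ => if lb x = ℓ then f ℓ else 0)).sum := List.sum_map_add
      _ = (l.map (fun y => f (lb y))).sum + f (lb x) := by rw [ih', sum_indicator hnd hx]
      _ = ((x :: l).map (fun y => f (lb y))).sum := by rw [List.map_cons, List.sum_cons]; ring

lemma length_eq_countP {ms l : List Int} {p : Int → Bool} (hms : ms.Nodup) (hl : l.Nodup)
    (h : ∀ x, x ∈ ms ↔ (x ∈ l ∧ p x = true)) : ms.length = l.countP p := by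
  rw [List.countP_eq_length_filter]
  apply List.Perm.length_eq
  rw [List.perm_ext_iff_of_nodup hms (hl.filter p)]
  intro a
  rw [h a, List.mem_filter]

-- ---------- Dict.erase lemmas ----------

lemma find?_filter_ne {ν : Type} (l : List (Int × ν)) (k k' : Int) :
    List.find? (fun p => p.1 == k') (l.filter (fun p => !(p.1 == k)))
      = if k' = k then none else List.find? (fun p => p.1 == k') l := by
  induction l with
  | nil => simp
  | cons p l ih =>
    by_cases h1 : p.1 = k <;> by_cases h2 : k' = k <;>
      simp [List.filter_cons, List.find?_cons, h1, h2, ih]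
    have : (k == k') = false := by simp; exact fun h => h2 h.symm
    simp [this]

lemma dict_get?_erase {ν : Type} (d : PySem.Dict Int ν) (k k' : Int) :
    (d.erase k).get? k' = if k' = k then none else d.get? k' := by
  obtain ⟨items⟩ := d
  show Option.map _ (List.find? _ (items.filter _)) = _
  rw [find?_filter_ne]
  split <;> rfl

lemma dict_getD_erase {ν : Type} (d : PySem.Dict Int ν) (k k' : Int) (d0 : ν) :
    (d.erase k).getD k' d0 = if k' = k then d0 else d.getD k' d0 := by
  simp only [PySem.Dict.getD, dict_get?_erase]
  split <;> rfl

lemma dict_keys_erase {ν : Type} (d : PySem.Dict Int ν) (k : Int) :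
    (d.erase k).keys = d.keys.filter (fun x => !(x == k)) := by
  obtain ⟨items⟩ := d
  simp only [PySem.Dict.erase, PySem.Dict.keys, List.filter_map]
  rfl


-- ---------- dict construction lemmas ----------

lemma getD_foldl_insert_fn {ν : Type} (g : Int → ν) (l : List Int) (hl : l.Nodup)
    (x : Int) (d0 : ν) :
    ((l.foldl (fun d i => d.insert i (g i)) (PySem.Dict.empty : PySem.Dict Int ν)).getD x d0)
      = if x ∈ l then g x else d0 := by
  have hitems := PySem.Dict.items_foldl_insert_fresh l (fun i => i) g PySem.Dict.empty
    (fun a _ => PySem.Dict.contains_empty a) (by simpa using hl)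
  have hkeys : (l.foldl (fun d i => d.insert i (g i)) (PySem.Dict.empty : PySem.Dict Int ν)).keys = l := by
    simp only [PySem.Dict.keys, hitems]
    simp [PySem.Dict.empty, Function.comp_def]
  by_cases hx : x ∈ l
  · have hmem : (x, g x) ∈ (l.foldl (fun d i => d.insert i (g i)) (PySem.Dict.empty : PySem.Dict Int ν)).items := by
      rw [hitems]
      exact List.mem_append.2 (Or.inr (List.mem_map.2 ⟨x, hx, rfl⟩))
    rw [PySem.Dict.getD_eq_get?_getD,
      PySem.Dict.get?_of_mem_items _ hmem (by rw [hkeys]; exact hl)]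
    simp [hx]
  · rw [PySem.Dict.getD_eq_get?_getD,
      (PySem.Dict.get?_eq_none_iff_not_mem_keys _ _).2 (by rw [hkeys]; exact hx)]
    simp [hx]

lemma keys_foldl_insert_fn {ν : Type} (g : Int → ν) (l : List Int) (hl : l.Nodup) :
    ((l.foldl (fun d i => d.insert i (g i)) (PySem.Dict.empty : PySem.Dict Int ν))).keys = l := by
  have hitems := PySem.Dict.items_foldl_insert_fresh l (fun i => i) g PySem.Dict.empty
    (fun a _ => PySem.Dict.contains_empty a) (by simpa using hl)
  simp only [PySem.Dict.keys, hitems]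
  simp [PySem.Dict.empty, Function.comp_def]

-- ---------- the graph A builds ----------

def graph0 (n : Int) : PySem.Dict Int (List Int) :=
  (nodesOf n).foldl (fun d i => d.insert i []) PySem.Dict.empty

def visited0 (n : Int) : PySem.Dict Int Bool :=
  (nodesOf n).foldl (fun d i => d.insert i false) PySem.Dict.empty

def buildGraph (n : Int) (E : List (Int × Int)) : PySem.Dict Int (List Int) :=
  E.foldl (fun g e =>
    (g.modify e.1 [] (fun l => l ++ [e.2])).modify e.2 [] (fun l => l ++ [e.1])) (graph0 n)

lemma nodup_nodes (n : Int) : (nodesOf n).Nodup := PySem.List.nodup_pyRange_one 0 n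

lemma visited0_getD (n : Int) (x : Int) : (visited0 n).getD x false = false := by
  unfold visited0
  rw [getD_foldl_insert_fn _ _ (nodup_nodes n)]
  split <;> rfl

lemma buildGraph_spec (n : Int) (E : List (Int × Int))
    (hin : ∀ e ∈ E, e.1 ∈ nodesOf n ∧ e.2 ∈ nodesOf n) :
    (buildGraph n E).keys = nodesOf n ∧
    (∀ x y : Int, y ∈ (buildGraph n E).getD x [] ↔ er E x y) := by
  unfold buildGraph
  suffices h : ∀ (E : List (Int × Int)) (g : PySem.Dict Int (List Int)) (P : Int → Int → Prop),
      (∀ e ∈ E, e.1 ∈ nodesOf n ∧ e.2 ∈ nodesOf n) →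
      g.keys = nodesOf n →
      (∀ x y, y ∈ g.getD x [] ↔ P x y) →
      (E.foldl (fun g e =>
        (g.modify e.1 [] (fun l => l ++ [e.2])).modify e.2 [] (fun l => l ++ [e.1])) g).keys = nodesOf n ∧
      (∀ x y, y ∈ (E.foldl (fun g e =>
        (g.modify e.1 [] (fun l => l ++ [e.2])).modify e.2 [] (fun l => l ++ [e.1])) g).getD x []
          ↔ (P x y ∨ er E x y)) by
    have h0k : (graph0 n).keys = nodesOf n := keys_foldl_insert_fn _ _ (nodup_nodes n)
    have h0a : ∀ x y : Int, y ∈ (graph0 n).getD x [] ↔ False := by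
      intro x y
      unfold graph0
      rw [getD_foldl_insert_fn _ _ (nodup_nodes n)]
      split <;> simp
    obtain ⟨hk, ha⟩ := h E (graph0 n) (fun _ _ => False) hin h0k h0a
    exact ⟨hk, fun x y => by rw [ha x y]; simp⟩
  intro E
  induction E with
  | nil =>
    intro g P _ hk ha
    simp only [List.foldl_nil]
    exact ⟨hk, fun x y => by rw [ha x y]; simp [er]⟩
  | cons e E ih =>
    intro g P hin' hk ha
    have he := hin' e List.mem_cons_self
    have hcont1 : g.contains e.1 = true := (PySem.Dict.contains_iff_mem_keys g e.1).2 (hk ▸ he.1)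
    have hk1 : (g.modify e.1 [] (fun l => l ++ [e.2])).keys = nodesOf n := by
      rw [PySem.Dict.keys_modify, PySem.Dict.keys_insert_of_contains _ _ hcont1, hk]
    have hcont2 : (g.modify e.1 [] (fun l => l ++ [e.2])).contains e.2 = true :=
      (PySem.Dict.contains_iff_mem_keys _ e.2).2 (hk1 ▸ he.2)
    have hk2 : ((g.modify e.1 [] (fun l => l ++ [e.2])).modify e.2 [] (fun l => l ++ [e.1])).keys = nodesOf n := by
      rw [PySem.Dict.keys_modify, PySem.Dict.keys_insert_of_contains _ _ hcont2, hk1]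
    have ha2 : ∀ x y, y ∈ ((g.modify e.1 [] (fun l => l ++ [e.2])).modify e.2 [] (fun l => l ++ [e.1])).getD x []
        ↔ (P x y ∨ (x = e.1 ∧ y = e.2) ∨ (x = e.2 ∧ y = e.1)) := by
      intro x y
      simp only [PySem.Dict.getD_modify]
      by_cases h2 : x = e.2
      · subst h2
        rw [if_pos rfl]
        by_cases h21 : e.2 = e.1
        · rw [if_pos h21, ← h21]
          simp only [List.mem_append, List.mem_singleton, ← ha]
          tauto
        · rw [if_neg h21]
          simp only [List.mem_append, List.mem_singleton, ← ha]
          tauto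
      · rw [if_neg h2]
        by_cases h1 : x = e.1
        · subst h1
          rw [if_pos rfl]
          simp only [List.mem_append, List.mem_singleton, ← ha]
          tauto
        · rw [if_neg h1]
          simp only [← ha]
          tauto
    obtain ⟨hk', ha'⟩ := ih _ _ (fun a haa => hin' a (List.mem_cons_of_mem e haa)) hk2 ha2
    simp only [List.foldl_cons]
    refine ⟨hk', fun x y => ?_⟩
    rw [ha' x y]
    have : er (e :: E) x y ↔ ((x = e.1 ∧ y = e.2) ∨ (x = e.2 ∧ y = e.1)) ∨ er E x y := by
      simp only [er, List.mem_cons, Prod.mk.injEq, Prod.ext_iff]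
      tauto
    rw [this]
    tauto


-- ---------- B-side: quick-find invariant ----------

lemma mem_nodesOf {n x : Int} : x ∈ nodesOf n ↔ 0 ≤ x ∧ x < n := PySem.List.mem_pyRange_one

lemma conn_nil {x y : Int} : conn [] x y ↔ x = y := by
  constructor
  · intro h
    rcases Relation.ReflTransGen.cases_head h with h1 | ⟨c, hc, _⟩
    · exact h1
    · rcases hc with hc | hc <;> cases hc
  · rintro rfl; exact conn_refl [] x

def labInit (n : Int) : PySem.Dict Int Int :=
  (PySem.List.pyRange 0 n 1).foldl (fun d i => d.insert i i) PySem.Dict.empty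

def memInit (n : Int) : PySem.Dict Int (List Int) :=
  (PySem.List.pyRange 0 n 1).foldl (fun d i => d.insert i [i]) PySem.Dict.empty

def bStep (st : PySem.Dict Int Int × PySem.Dict Int (List Int)) (p : List Int) :
    PySem.Dict Int Int × PySem.Dict Int (List Int) :=
  let a := st.1.getD ((PySem.List.pyGet? p 0).getD 0) 0
  let b := st.1.getD ((PySem.List.pyGet? p 1).getD 0) 0
  if a ≠ b then
    let ab := if (st.2.getD a []).length > (st.2.getD b []).length then (b, a) else (a, b)
    let label' := (st.2.getD ab.1 []).foldl (fun l k => l.insert k ab.2) st.1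
    let members' := (st.2.modify ab.2 [] (fun l => l ++ st.2.getD ab.1 [])).erase ab.1
    (label', members')
  else st

lemma alt_eq (n : Int) (astronaut : List (List Int)) :
    journeyToMoon_alt n astronaut =
      (let st := astronaut.foldl bStep (labInit n, memInit n)
       let ts := st.2.values.foldl
         (fun (ts : Int × Int) g => (ts.1 + (g.length : Int), ts.2 + (g.length : Int) * (g.length : Int))) (0, 0)
       PySem.Int.floordiv (ts.1 * ts.1 - ts.2) 2) := rfl

structure BInv (n : Int) (E : List (Int × Int))
    (st : PySem.Dict Int Int × PySem.Dict Int (List Int)) : Prop where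
  labKeys : st.1.keys = nodesOf n
  memNodupKeys : st.2.keys.Nodup
  memNodup : ∀ ℓ : Int, (st.2.getD ℓ []).Nodup
  memMem : ∀ ℓ x : Int, x ∈ st.2.getD ℓ [] ↔ (x ∈ nodesOf n ∧ st.1.getD x 0 = ℓ)
  labMemKeys : ∀ x ∈ nodesOf n, st.1.getD x 0 ∈ st.2.keys
  eqv : ∀ x ∈ nodesOf n, ∀ y ∈ nodesOf n, (st.1.getD x 0 = st.1.getD y 0 ↔ conn E x y)

lemma bInit_inv (n : Int) : BInv n [] (labInit n, memInit n) := by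
  have hlab : ∀ x : Int, (labInit n).getD x 0 = if x ∈ nodesOf n then x else 0 :=
    fun x => getD_foldl_insert_fn (fun i => i) _ (nodup_nodes n) x 0
  have hmem : ∀ ℓ : Int, (memInit n).getD ℓ [] = if ℓ ∈ nodesOf n then [ℓ] else [] :=
    fun ℓ => getD_foldl_insert_fn (fun i => [i]) _ (nodup_nodes n) ℓ []
  refine ⟨keys_foldl_insert_fn _ _ (nodup_nodes n), ?_, ?_, ?_, ?_, ?_⟩
  · show (memInit n).keys.Nodup
    have hk2 : (memInit n).keys = nodesOf n := keys_foldl_insert_fn (fun i => [i]) _ (nodup_nodes n)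
    rw [hk2]; exact nodup_nodes n
  · intro ℓ; rw [hmem ℓ]; split <;> simp
  · intro ℓ x
    rw [hmem ℓ, hlab x]
    by_cases hx : x ∈ nodesOf n <;> by_cases hℓ : ℓ ∈ nodesOf n <;>
      simp [hx, hℓ] <;> rintro rfl <;> first | exact hℓ hx | exact hx hℓ
  · intro x hx
    show (labInit n).getD x 0 ∈ (memInit n).keys
    have hk2 : (memInit n).keys = nodesOf n := keys_foldl_insert_fn (fun i => [i]) _ (nodup_nodes n)
    rw [hk2, hlab x, if_pos hx]
    exact hx
  · intro x hx y hy
    rw [hlab x, if_pos hx, hlab y, if_pos hy, conn_nil]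

lemma relabel_getD (v : Int) : ∀ (ms : List Int) (lab : PySem.Dict Int Int) (x : Int),
    ((ms.foldl (fun l k => l.insert k v) lab).getD x 0) = if x ∈ ms then v else lab.getD x 0 := by
  intro ms
  induction ms with
  | nil => simp
  | cons k ms ih =>
    intro lab x
    rw [List.foldl_cons, ih]
    by_cases hx : x ∈ ms
    · simp [hx]
    · by_cases hxk : x = k
      · simp [hx, hxk, PySem.Dict.getD_insert]
      · simp [hx, hxk, PySem.Dict.getD_insert]

lemma relabel_keys (n v : Int) : ∀ (ms : List Int) (lab : PySem.Dict Int Int),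
    lab.keys = nodesOf n → (∀ k ∈ ms, k ∈ nodesOf n) →
    ((ms.foldl (fun l k => l.insert k v) lab)).keys = nodesOf n := by
  intro ms
  induction ms with
  | nil => intro lab hk _; exact hk
  | cons k ms ih =>
    intro lab hk hms
    rw [List.foldl_cons]
    refine ih _ ?_ (fun a ha => hms a (List.mem_cons_of_mem k ha))
    rw [PySem.Dict.keys_insert_of_contains _ _ ((PySem.Dict.contains_iff_mem_keys _ _).2 ?_), hk]
    rw [hk]; exact hms k List.mem_cons_self

lemma merge_inv {n : Int} {E : List (Int × Int)} {lab : PySem.Dict Int Int}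
    {mem : PySem.Dict Int (List Int)} (hinv : BInv n E (lab, mem))
    {A B u v : Int} (hA : A ∈ nodesOf n) (hB : B ∈ nodesOf n)
    (hne : lab.getD A 0 ≠ lab.getD B 0)
    (huv : (u = lab.getD A 0 ∧ v = lab.getD B 0) ∨ (u = lab.getD B 0 ∧ v = lab.getD A 0)) :
    BInv n (E ++ [(A, B)])
      ((mem.getD u []).foldl (fun l k => l.insert k v) lab,
       (mem.modify v [] (fun l => l ++ mem.getD u [])).erase u) := by
  obtain ⟨hkeys, hmnod, hlnod, hmm, hlk, heqv⟩ := hinv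
  dsimp only at hkeys hmnod hlnod hmm hlk heqv
  have huvne : u ≠ v := by rcases huv with ⟨rfl, rfl⟩ | ⟨rfl, rfl⟩ <;> [exact hne; exact hne.symm]
  have hv_keys : v ∈ mem.keys := by
    rcases huv with ⟨rfl, rfl⟩ | ⟨rfl, rfl⟩ <;> [exact hlk B hB; exact hlk A hA]
  have hms_nodes : ∀ k ∈ mem.getD u [], k ∈ nodesOf n := fun k hk => ((hmm u k).1 hk).1
  have hlab' : ∀ x : Int, ((mem.getD u []).foldl (fun l k => l.insert k v) lab).getD x 0
      = if x ∈ mem.getD u [] then v else lab.getD x 0 := relabel_getD v _ lab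
  have hlabn : ∀ x ∈ nodesOf n, ((mem.getD u []).foldl (fun l k => l.insert k v) lab).getD x 0
      = if lab.getD x 0 = u then v else lab.getD x 0 := by
    intro x hx
    rw [hlab' x]
    by_cases hxu : lab.getD x 0 = u
    · rw [if_pos ((hmm u x).2 ⟨hx, hxu⟩), if_pos hxu]
    · rw [if_neg (fun hmem' => hxu ((hmm u x).1 hmem').2), if_neg hxu]
  have hcont_v : mem.contains v = true := (PySem.Dict.contains_iff_mem_keys _ _).2 hv_keys
  have hmem' : ∀ ℓ : Int, ((mem.modify v [] (fun l => l ++ mem.getD u [])).erase u).getD ℓ []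
      = if ℓ = u then [] else if ℓ = v then mem.getD v [] ++ mem.getD u [] else mem.getD ℓ [] := by
    intro ℓ
    rw [dict_getD_erase, PySem.Dict.getD_modify]
  have hkeys' : ((mem.modify v [] (fun l => l ++ mem.getD u [])).erase u).keys
      = mem.keys.filter (fun x => !(x == u)) := by
    rw [dict_keys_erase, PySem.Dict.keys_modify, PySem.Dict.keys_insert_of_contains _ _ hcont_v]
  refine ⟨relabel_keys n v _ lab hkeys hms_nodes, ?_, ?_, ?_, ?_, ?_⟩
  · rw [hkeys']; exact hmnod.filter _
  · intro ℓ
    rw [hmem' ℓ]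
    by_cases h1 : ℓ = u
    · simp [h1]
    · rw [if_neg h1]
      by_cases h2 : ℓ = v
      · rw [if_pos h2]
        refine (hlnod v).append (hlnod u) (List.disjoint_left.2 ?_)
        intro a hav hau
        exact huvne.symm (((hmm v a).1 hav).2.symm.trans ((hmm u a).1 hau).2)
      · rw [if_neg h2]; exact hlnod ℓ
  · intro ℓ x
    rw [hmem' ℓ, hlab' x]
    by_cases hxm : x ∈ mem.getD u []
    · have hxn := hms_nodes x hxm
      have hxu : lab.getD x 0 = u := ((hmm u x).1 hxm).2
      rw [if_pos hxm]
      by_cases h1 : ℓ = u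
      · rw [if_pos h1]
        simp only [List.not_mem_nil, false_iff]
        rintro ⟨_, hv⟩
        exact huvne (hv.trans h1).symm
      · rw [if_neg h1]
        by_cases h2 : ℓ = v
        · rw [if_pos h2, List.mem_append]
          exact ⟨fun _ => ⟨hxn, h2.symm⟩, fun _ => Or.inr hxm⟩
        · rw [if_neg h2]
          constructor
          · intro hxl
            exact absurd ((((hmm ℓ x).1 hxl).2).symm.trans hxu) h1
          · rintro ⟨_, hv⟩; exact absurd hv.symm h2
    · rw [if_neg hxm]
      by_cases h1 : ℓ = u
      · rw [if_pos h1]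
        simp only [List.not_mem_nil, false_iff]
        rintro ⟨h2, h3⟩
        exact hxm ((hmm u x).2 ⟨h2, h3.trans h1⟩)
      · rw [if_neg h1]
        by_cases h2 : ℓ = v
        · rw [if_pos h2, List.mem_append]
          constructor
          · rintro (h | h)
            · exact ⟨((hmm v x).1 h).1, ((hmm v x).1 h).2.trans h2.symm⟩
            · exact absurd h hxm
          · rintro ⟨h3, h4⟩
            exact Or.inl ((hmm v x).2 ⟨h3, h4.trans h2⟩)
        · rw [if_neg h2]; exact hmm ℓ x
  · intro x hx
    rw [hkeys', List.mem_filter, hlabn x hx]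
    by_cases hxu : lab.getD x 0 = u
    · rw [if_pos hxu]; exact ⟨hv_keys, by simp [huvne.symm]⟩
    · rw [if_neg hxu]; exact ⟨hlk x hx, by simp [hxu]⟩
  · intro x hx y hy
    rw [hlabn x hx, hlabn y hy, conn_snoc, ← heqv x hx y hy, ← heqv x hx A hA,
      ← heqv x hx B hB, ← heqv B hB y hy, ← heqv A hA y hy]
    rcases huv with ⟨rfl, rfl⟩ | ⟨rfl, rfl⟩ <;> split_ifs <;> constructor <;> intro hh <;> omega

lemma bStep_inv {n : Int} {E : List (Int × Int)}
    {st : PySem.Dict Int Int × PySem.Dict Int (List Int)} (hinv : BInv n E st) {p : List Int}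
    (h0 : fstP p ∈ nodesOf n) (h1 : sndP p ∈ nodesOf n) :
    BInv n (E ++ [(fstP p, sndP p)]) (bStep st p) := by
  obtain ⟨lab, mem⟩ := st
  unfold bStep
  dsimp only
  by_cases hne : lab.getD ((PySem.List.pyGet? p 0).getD 0) 0 ≠ lab.getD ((PySem.List.pyGet? p 1).getD 0) 0
  · rw [if_pos hne]
    by_cases hlen : (mem.getD (lab.getD ((PySem.List.pyGet? p 0).getD 0) 0) []).length
        > (mem.getD (lab.getD ((PySem.List.pyGet? p 1).getD 0) 0) []).length
    · rw [if_pos hlen]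
      exact merge_inv hinv h0 h1 hne (Or.inr ⟨rfl, rfl⟩)
    · rw [if_neg hlen]
      exact merge_inv hinv h0 h1 hne (Or.inl ⟨rfl, rfl⟩)
  · rw [if_neg hne]
    have hab : conn E (fstP p) (sndP p) :=
      (hinv.eqv (fstP p) h0 (sndP p) h1).1 (not_not.1 (fun h => hne h))
    obtain ⟨hkeys, hmnod, hlnod, hmm, hlk, heqv⟩ := hinv
    refine ⟨hkeys, hmnod, hlnod, hmm, hlk, ?_⟩
    intro x hx y hy
    rw [heqv x hx y hy, conn_snoc_of_conn hab]

lemma bFold_inv (n : Int) : ∀ (asts : List (List Int)) (E : List (Int × Int))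
    (st : PySem.Dict Int Int × PySem.Dict Int (List Int)),
    BInv n E st →
    (∀ p ∈ asts, fstP p ∈ nodesOf n ∧ sndP p ∈ nodesOf n) →
    BInv n (E ++ edgesOf asts) (asts.foldl bStep st) := by
  intro asts
  induction asts with
  | nil => intro E st hinv _; simpa [edgesOf] using hinv
  | cons p asts ih =>
    intro E st hinv hpre
    have hp := hpre p List.mem_cons_self
    have hstep := bStep_inv hinv hp.1 hp.2
    have := ih (E ++ [(fstP p, sndP p)]) (bStep st p) hstep
      (fun q hq => hpre q (List.mem_cons_of_mem p hq))
    rw [List.foldl_cons]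
    simpa [edgesOf, List.append_assoc] using this


-- ---------- B-side: final value ----------

def clsCnt (n : Int) (lab : PySem.Dict Int Int) (ℓ : Int) : Int :=
  ((nodesOf n).countP (fun w => lab.getD w 0 == ℓ) : Int)

def clsSize (n : Int) (lab : PySem.Dict Int Int) (x : Int) : Int := clsCnt n lab (lab.getD x 0)

lemma ts_foldl (vs : List (List Int)) : ∀ (t s : Int),
    vs.foldl (fun (ts : Int × Int) g =>
      (ts.1 + (g.length : Int), ts.2 + (g.length : Int) * (g.length : Int))) (t, s)
      = (t + (vs.map (fun g => (g.length : Int))).sum,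
         s + (vs.map (fun g => (g.length : Int) * (g.length : Int))).sum) := by
  induction vs with
  | nil => intro t s; simp
  | cons g vs ih =>
    intro t s
    rw [List.foldl_cons, ih]
    refine Prod.ext ?_ ?_ <;> simp <;> ring

lemma alt_value (n : Int) (astronaut : List (List Int))
    (hinv : BInv n (edgesOf astronaut) (astronaut.foldl bStep (labInit n, memInit n))) :
    journeyToMoon_alt n astronaut
      = PySem.Int.floordiv
          (((nodesOf n).length : Int) * ((nodesOf n).length : Int)
            - ((nodesOf n).map
                (fun x => clsSize n (astronaut.foldl bStep (labInit n, memInit n)).1 x)).sum) 2 := by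
  rw [alt_eq]
  dsimp only
  obtain ⟨hkeys, hmnod, hlnod, hmm, hlk, heqv⟩ := hinv
  set st := astronaut.foldl bStep (labInit n, memInit n) with hst
  have hvals : st.2.values = st.2.keys.map (fun ℓ => st.2.getD ℓ []) :=
    PySem.Dict.values_eq_map_keys st.2 hmnod []
  have hlen : ∀ ℓ ∈ st.2.keys, ((st.2.getD ℓ []).length : Int) = clsCnt n st.1 ℓ := by
    intro ℓ _
    unfold clsCnt
    congr 1
    refine length_eq_countP (hlnod ℓ) (nodup_nodes n) ?_
    intro x
    rw [hmm ℓ x]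
    simp [beq_iff_eq]
  have hT : (st.2.keys.map (fun ℓ => clsCnt n st.1 ℓ)).sum = ((nodesOf n).length : Int) := by
    have := sum_counts hmnod (fun x => st.1.getD x 0) (fun _ => 1) (l := nodesOf n) hlk
    calc (st.2.keys.map (fun ℓ => clsCnt n st.1 ℓ)).sum
        = (st.2.keys.map (fun ℓ =>
            ((nodesOf n).countP (fun w => st.1.getD w 0 == ℓ) : Int) * (1 : Int))).sum := by
          refine congrArg List.sum (List.map_congr_left ?_)
          intro ℓ _
          rw [mul_one]
          rfl
      _ = ((nodesOf n).map (fun _ => (1 : Int))).sum := this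
      _ = ((nodesOf n).length : Int) := by simp
  have hQ : (st.2.keys.map (fun ℓ => clsCnt n st.1 ℓ * clsCnt n st.1 ℓ)).sum
      = ((nodesOf n).map (fun x => clsSize n st.1 x)).sum := by
    have := sum_counts hmnod (fun x => st.1.getD x 0) (fun ℓ => clsCnt n st.1 ℓ)
      (l := nodesOf n) hlk
    calc (st.2.keys.map (fun ℓ => clsCnt n st.1 ℓ * clsCnt n st.1 ℓ)).sum
        = (st.2.keys.map (fun ℓ =>
            ((nodesOf n).countP (fun w => st.1.getD w 0 == ℓ) : Int) * clsCnt n st.1 ℓ)).sum := rfl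
      _ = ((nodesOf n).map (fun x => clsCnt n st.1 (st.1.getD x 0))).sum := this
      _ = ((nodesOf n).map (fun x => clsSize n st.1 x)).sum := rfl
  rw [hvals, ts_foldl, List.map_map, List.map_map]
  have h1 : (st.2.keys.map ((fun g => (g.length : Int)) ∘ fun ℓ => st.2.getD ℓ [])).sum
      = ((nodesOf n).length : Int) := by
    rw [← hT]
    refine congrArg List.sum (List.map_congr_left ?_)
    intro ℓ hℓ
    exact hlen ℓ hℓ
  have h2 : (st.2.keys.map ((fun g => (g.length : Int) * (g.length : Int)) ∘ fun ℓ => st.2.getD ℓ [])).sum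
      = ((nodesOf n).map (fun x => clsSize n st.1 x)).sum := by
    rw [← hQ]
    refine congrArg List.sum (List.map_congr_left ?_)
    intro ℓ hℓ
    show ((st.2.getD ℓ []).length : Int) * ((st.2.getD ℓ []).length : Int) = _
    rw [hlen ℓ hℓ]
  rw [h1, h2]
  ring_nf


-- ---------- A-side: DFS specification ----------

def cntV (n : Int) (vis : PySem.Dict Int Bool) : Nat :=
  (nodesOf n).countP (fun x => vis.getD x false)

def uvV (n : Int) (vis : PySem.Dict Int Bool) : Nat :=
  (nodesOf n).countP (fun x => !(vis.getD x false))

lemma getD_insert_true (vis : PySem.Dict Int Bool) (c x : Int) :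
    (vis.insert c true).getD x false = if x = c then true else vis.getD x false :=
  PySem.Dict.getD_insert vis c x true false

lemma cntV_insert {n : Int} {vis : PySem.Dict Int Bool} {c : Int}
    (hc : c ∈ nodesOf n) (hf : vis.getD c false = false) :
    cntV n (vis.insert c true) = cntV n vis + 1 := by
  refine countP_update (nodup_nodes n) hc (fun y hy => ?_) hf ?_
  · rw [getD_insert_true, if_neg hy]
  · rw [getD_insert_true, if_pos rfl]

lemma uvV_insert {n : Int} {vis : PySem.Dict Int Bool} {c : Int}
    (hc : c ∈ nodesOf n) (hf : vis.getD c false = false) :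
    uvV n vis = uvV n (vis.insert c true) + 1 := by
  refine countP_update (nodup_nodes n) hc (fun y hy => ?_) ?_ ?_
  · rw [getD_insert_true, if_neg hy]
  · rw [getD_insert_true, if_pos rfl]; rfl
  · rw [hf]; rfl

structure Reach (n : Int) (E : List (Int × Int)) (u : Int)
    (vis : PySem.Dict Int Bool) (acc : List Int) (k : Nat)
    (res : List Int × PySem.Dict Int Bool) : Prop where
  mono : ∀ x, vis.getD x false = true → res.2.getD x false = true
  sound : ∀ x, res.2.getD x false = true → vis.getD x false = true ∨ (conn E u x ∧ x ∈ nodesOf n)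
  complete : ∀ x, res.2.getD x false = true → vis.getD x false = false →
    ∀ y, er E x y → res.2.getD y false = true
  visNodes : ∀ x, res.2.getD x false = true → x ∈ nodesOf n
  len : res.1.length + cntV n vis = acc.length + k + cntV n res.2

lemma er_nodes {n : Int} {E : List (Int × Int)}
    (hE : ∀ e ∈ E, e.1 ∈ nodesOf n ∧ e.2 ∈ nodesOf n) {x y : Int} (h : er E x y) :
    x ∈ nodesOf n ∧ y ∈ nodesOf n := by
  rcases h with h | h
  · exact ⟨(hE _ h).1, (hE _ h).2⟩
  · exact ⟨(hE _ h).2, (hE _ h).1⟩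

lemma dfs_fold_spec (n : Int) (E : List (Int × Int)) (g : PySem.Dict Int (List Int))
    (hadj : ∀ x y : Int, y ∈ g.getD x [] ↔ er E x y)
    (hE : ∀ e ∈ E, e.1 ∈ nodesOf n ∧ e.2 ∈ nodesOf n) (f : Nat)
    (IH : ∀ (u : Int) (vis : PySem.Dict Int Bool) (acc : List Int),
      vis.getD u false = true →
      (∀ x, vis.getD x false = true → x ∈ nodesOf n) →
      uvV n vis + 1 ≤ f →
      Reach n E u vis acc 1 (dfsA f u g vis acc) ∧
      (∀ y, er E u y → (dfsA f u g vis acc).2.getD y false = true) ∧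
      uvV n (dfsA f u g vis acc).2 ≤ uvV n vis)
    (u : Int) :
    ∀ (conns : List Int), (∀ c ∈ conns, er E u c) →
    ∀ (vis : PySem.Dict Int Bool) (acc : List Int),
    (∀ x, vis.getD x false = true → x ∈ nodesOf n) →
    uvV n vis ≤ f →
    Reach n E u vis acc 0 (conns.foldl
      (fun st c => if st.2.getD c false = true then st
        else dfsA f c g (st.2.insert c true) st.1) (acc, vis)) ∧
    (∀ c ∈ conns, (conns.foldl
      (fun st c => if st.2.getD c false = true then st
        else dfsA f c g (st.2.insert c true) st.1) (acc, vis)).2.getD c false = true) ∧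
    uvV n (conns.foldl
      (fun st c => if st.2.getD c false = true then st
        else dfsA f c g (st.2.insert c true) st.1) (acc, vis)).2 ≤ uvV n vis := by
  intro conns
  induction conns with
  | nil =>
    intro _ vis acc hvn hfuel
    simp only [List.foldl_nil]
    refine ⟨⟨fun x hx => hx, fun x hx => Or.inl hx, fun x hx hx' => ?_, hvn, by dsimp only; omega⟩,
      fun c hc => absurd hc (List.not_mem_nil), le_refl _⟩
    dsimp only at hx hx'
    rw [hx] at hx'; cases hx'
  | cons c cs ih =>
    intro hconns vis acc hvn hfuel
    have hcer : er E u c := hconns c List.mem_cons_self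
    rw [List.foldl_cons]
    by_cases hvc : vis.getD c false = true
    · rw [if_pos hvc]
      obtain ⟨hre, hhit, huv⟩ := ih (fun a ha => hconns a (List.mem_cons_of_mem c ha)) vis acc hvn hfuel
      refine ⟨hre, fun a ha => ?_, huv⟩
      rcases List.mem_cons.1 ha with rfl | ha'
      · exact hre.mono a hvc
      · exact hhit a ha'
    · rw [if_neg hvc]
      have hvcf : vis.getD c false = false := by
        cases h : vis.getD c false
        · rfl
        · exact absurd h hvc
      have hcn : c ∈ nodesOf n := (er_nodes hE hcer).2
      have hvn2 : ∀ x, (vis.insert c true).getD x false = true → x ∈ nodesOf n := by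
        intro x hx
        rw [getD_insert_true] at hx
        by_cases hxc : x = c
        · exact hxc ▸ hcn
        · rw [if_neg hxc] at hx; exact hvn x hx
      have hcV : (vis.insert c true).getD c false = true := by
        rw [getD_insert_true, if_pos rfl]
      have huv2 : uvV n vis = uvV n (vis.insert c true) + 1 := uvV_insert hcn hvcf
      have hcnt2 : cntV n (vis.insert c true) = cntV n vis + 1 := cntV_insert hcn hvcf
      obtain ⟨hre1, hnb1, huv1⟩ := IH c (vis.insert c true) acc hcV hvn2 (by omega)
      obtain ⟨hre2, hhit2, huv2'⟩ := ih (fun a ha => hconns a (List.mem_cons_of_mem c ha))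
        (dfsA f c g (vis.insert c true) acc).2 (dfsA f c g (vis.insert c true) acc).1
        hre1.visNodes (by omega)
      set res1 := dfsA f c g (vis.insert c true) acc with hres1
      set res2 := cs.foldl (fun st c => if st.2.getD c false = true then st
        else dfsA f c g (st.2.insert c true) st.1) (res1.1, res1.2) with hres2
      have hmono01 : ∀ x, vis.getD x false = true → res1.2.getD x false = true := by
        intro x hx
        refine hre1.mono x ?_
        rw [getD_insert_true]
        split <;> [rfl; exact hx]
      have hconnuc : conn E u c := conn_single E hcer
      refine ⟨⟨?_, ?_, ?_, ?_, ?_⟩, ?_, ?_⟩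
      · intro x hx
        exact hre2.mono x (hmono01 x hx)
      · intro x hx
        rcases hre2.sound x hx with hx1 | ⟨hconn, hxn⟩
        · rcases hre1.sound x hx1 with hx2 | ⟨hconn, hxn⟩
          · rw [getD_insert_true] at hx2
            by_cases hxc : x = c
            · exact Or.inr ⟨hxc ▸ hconnuc, hxc ▸ hcn⟩
            · rw [if_neg hxc] at hx2; exact Or.inl hx2
          · exact Or.inr ⟨hconnuc.trans hconn, hxn⟩
        · exact Or.inr ⟨hconn, hxn⟩
      · -- completeness
        intro x hx hxf y hy
        by_cases hx1 : res1.2.getD x false = true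
        · by_cases hx2 : (vis.insert c true).getD x false = true
          · have hxc : x = c := by
              rw [getD_insert_true] at hx2
              by_cases hxc : x = c
              · exact hxc
              · rw [if_neg hxc] at hx2; rw [hx2] at hxf; cases hxf
            exact hre2.mono y (hnb1 y (hxc ▸ hy))
          · have hx2f : (vis.insert c true).getD x false = false := by
              cases h : (vis.insert c true).getD x false
              · rfl
              · exact absurd h hx2
            exact hre2.mono y (hre1.complete x hx1 hx2f y hy)
        · have hx1f : res1.2.getD x false = false := by
            cases h : res1.2.getD x false
            · rfl
            · exact absurd h hx1
          exact hre2.complete x hx hx1f y hy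
      · exact hre2.visNodes
      · have l1 := hre1.len
        have l2 := hre2.len
        omega
      · intro a ha
        rcases List.mem_cons.1 ha with rfl | ha'
        · exact hre2.mono a (hre1.mono a hcV)
        · exact hhit2 a ha'
      · omega

lemma dfs_spec (n : Int) (E : List (Int × Int)) (g : PySem.Dict Int (List Int))
    (hadj : ∀ x y : Int, y ∈ g.getD x [] ↔ er E x y)
    (hE : ∀ e ∈ E, e.1 ∈ nodesOf n ∧ e.2 ∈ nodesOf n) :
    ∀ (f : Nat) (u : Int) (vis : PySem.Dict Int Bool) (acc : List Int),
      vis.getD u false = true →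
      (∀ x, vis.getD x false = true → x ∈ nodesOf n) →
      uvV n vis + 1 ≤ f →
      Reach n E u vis acc 1 (dfsA f u g vis acc) ∧
      (∀ y, er E u y → (dfsA f u g vis acc).2.getD y false = true) ∧
      uvV n (dfsA f u g vis acc).2 ≤ uvV n vis := by
  intro f
  induction f with
  | zero => intro u vis acc _ _ hfuel; omega
  | succ f ihf =>
    intro u vis acc hu hvn hfuel
    obtain ⟨hre, hhit, huv⟩ := dfs_fold_spec n E g hadj hE f ihf u (g.getD u [])
      (fun c hc => (hadj u c).1 hc) vis acc hvn (by omega)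
    show Reach n E u vis acc 1 (((g.getD u []).foldl _ (acc, vis)).1 ++ [u],
        ((g.getD u []).foldl _ (acc, vis)).2) ∧ _
    refine ⟨⟨hre.mono, hre.sound, hre.complete, hre.visNodes, ?_⟩, ?_, huv⟩
    · have := hre.len
      dsimp only at this ⊢
      rw [List.length_append]
      dsimp only [List.length_cons, List.length_nil]
      omega
    · intro y hy
      exact hhit y ((hadj u y).2 hy)


-- ---------- A-side: main loop ----------

lemma countP_not (l : List Int) (p : Int → Bool) :
    l.countP p + l.countP (fun x => !(p x)) = l.length := by
  induction l with
  | nil => simp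
  | cons a l ih =>
    rw [List.countP_cons, List.countP_cons]
    cases h : p a <;> simp [h] <;> omega

lemma sum_filter_add_filter_not (l : List Int) (p : Int → Bool) (f : Int → Int) :
    ((l.filter p).map f).sum + ((l.filter (fun x => !(p x))).map f).sum = (l.map f).sum := by
  induction l with
  | nil => simp
  | cons a l ih =>
    rw [List.filter_cons, List.filter_cons]
    cases h : p a <;> simp [h] <;> omega

lemma vis_closed_conn {E : List (Int × Int)} {vis : PySem.Dict Int Bool}
    (hcl : ∀ x y, vis.getD x false = true → er E x y → vis.getD y false = true)
    {x y : Int} (hx : vis.getD x false = true) (hconn : conn E x y) :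
    vis.getD y false = true := by
  induction hconn with
  | refl => exact hx
  | tail _ step ih => exact hcl _ _ ih step

lemma aLoop (n : Int) (E : List (Int × Int)) (g : PySem.Dict Int (List Int))
    (lab : PySem.Dict Int Int)
    (hadj : ∀ x y : Int, y ∈ g.getD x [] ↔ er E x y)
    (hE : ∀ e ∈ E, e.1 ∈ nodesOf n ∧ e.2 ∈ nodesOf n)
    (heqv : ∀ x ∈ nodesOf n, ∀ y ∈ nodesOf n, (lab.getD x 0 = lab.getD y 0 ↔ conn E x y)) :
    ∀ (rest done : List Int), nodesOf n = done ++ rest →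
    ∀ (vis : PySem.Dict Int Bool) (groups : List Int),
    (∀ x, vis.getD x false = true → x ∈ nodesOf n) →
    (∀ x y, vis.getD x false = true → er E x y → vis.getD y false = true) →
    (∀ x, vis.getD x false = true → g.getD x [] ≠ []) →
    (∀ x ∈ done, g.getD x [] ≠ [] → vis.getD x false = true) →
    (groups.sum = (cntV n vis : Int) + (done.countP (fun x => g.getD x [] == []) : Int)) →
    ((groups.map (fun s => s * s)).sum
      = (((nodesOf n).filter (fun x => vis.getD x false)).map (fun x => clsSize n lab x)).sum
        + (done.countP (fun x => g.getD x [] == []) : Int)) →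
    ((rest.foldl (fun (st : PySem.Dict Int Bool × List Int) i =>
        if st.1.getD i false = true then st
        else if g.getD i [] = [] then (st.1, st.2 ++ [(1 : Int)])
        else
          ((dfsA (n.toNat + 1) i g (st.1.insert i true) []).2,
            st.2 ++ [(((dfsA (n.toNat + 1) i g (st.1.insert i true) []).1.length : Int))]))
      (vis, groups)).2.sum = ((nodesOf n).length : Int) ∧
     (((rest.foldl (fun (st : PySem.Dict Int Bool × List Int) i =>
        if st.1.getD i false = true then st
        else if g.getD i [] = [] then (st.1, st.2 ++ [(1 : Int)])
        else
          ((dfsA (n.toNat + 1) i g (st.1.insert i true) []).2,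
            st.2 ++ [(((dfsA (n.toNat + 1) i g (st.1.insert i true) []).1.length : Int))]))
      (vis, groups)).2.map (fun s => s * s)).sum
       = ((nodesOf n).map (fun x => clsSize n lab x)).sum)) := by
  intro rest
  induction rest with
  | nil =>
    intro done hsplit vis groups hvn hcl hniso hcov hsum hsq
    simp only [List.foldl_nil]
    rw [List.append_nil] at hsplit
    subst hsplit
    have hisoNotVis : ∀ x ∈ nodesOf n,
        ((g.getD x [] == []) : Bool) = !(vis.getD x false) := by
      intro x hx
      cases hv : vis.getD x false
      · cases hadjx : (g.getD x [] == [])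
        · exact absurd (hcov x hx (by simpa using hadjx)) (by simp [hv])
        · rfl
      · have h2 := hniso x hv
        simpa using h2
    have hcnt : (nodesOf n).countP (fun x => g.getD x [] == [])
        = (nodesOf n).countP (fun x => !(vis.getD x false)) :=
      countP_congr_mem hisoNotVis
    constructor
    · rw [hsum, hcnt]
      have := countP_not (nodesOf n) (fun x => vis.getD x false)
      unfold cntV
      push_cast
      omega
    · rw [hsq, hcnt]
      have hpart := sum_filter_add_filter_not (nodesOf n) (fun x => vis.getD x false)
        (fun x => clsSize n lab x)
      have hunv : (((nodesOf n).filter (fun x => !(vis.getD x false))).map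
          (fun x => clsSize n lab x)).sum
          = ((nodesOf n).countP (fun x => !(vis.getD x false)) : Int) * 1 := by
        refine sum_map_filter_const ?_
        intro x hx hpx
        have hxn : x ∈ nodesOf n := hx
        have hxv : vis.getD x false = false := by
          cases h : vis.getD x false
          · rfl
          · rw [h] at hpx; cases hpx
        have hxiso : g.getD x [] = [] := by
          by_contra hne
          have := hcov x hxn hne
          rw [this] at hxv; cases hxv
        have hnoer : ∀ y, ¬ er E x y := by
          intro y hy
          have : y ∈ g.getD x [] := (hadj x y).2 hy
          rw [hxiso] at this
          cases this
        unfold clsSize clsCnt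
        have h1 : (nodesOf n).countP (fun w => lab.getD w 0 == lab.getD x 0) = 1 := by
          have := length_eq_countP (ms := [x]) (l := nodesOf n)
            (p := fun w => lab.getD w 0 == lab.getD x 0)
            (by simp) (nodup_nodes n) ?_
          · simpa using this.symm
          · intro w
            simp only [List.mem_singleton, beq_iff_eq]
            constructor
            · rintro rfl; exact ⟨hxn, rfl⟩
            · rintro ⟨hwn, hww⟩
              have hconn : conn E w x := (heqv w hwn x hxn).1 hww
              rcases Relation.ReflTransGen.cases_tail hconn with h1 | ⟨c, _, hc⟩
              · exact h1.symm
              · exact absurd (er_symm E hc) (hnoer c)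
        rw [h1]
        norm_num
      rw [hunv] at hpart
      rw [← hpart]
      push_cast
      ring
  | cons i rest ihr =>
    intro done hsplit vis groups hvn hcl hniso hcov hsum hsq
    have hin : i ∈ nodesOf n := by rw [hsplit]; simp
    have hsplit' : nodesOf n = (done ++ [i]) ++ rest := by rw [hsplit]; simp
    rw [List.foldl_cons]
    by_cases hvi : vis.getD i false = true
    · rw [if_pos hvi]
      have hcnt' : ((done ++ [i]).countP (fun x => g.getD x [] == []) : Int)
          = (done.countP (fun x => g.getD x [] == []) : Int) := by
        rw [List.countP_append]
        simp [hniso i hvi]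
      exact ihr (done ++ [i]) hsplit' vis groups hvn hcl hniso
        (by
          intro x hx hne
          rcases List.mem_append.1 hx with hx | hx
          · exact hcov x hx hne
          · rw [List.mem_singleton.1 hx]; exact hvi)
        (by rw [hsum, hcnt']) (by rw [hsq, hcnt'])
    · rw [if_neg hvi]
      have hvif : vis.getD i false = false := by
        cases h : vis.getD i false
        · rfl
        · exact absurd h hvi
      by_cases hiso : g.getD i [] = []
      · rw [if_pos hiso]
        have hcnt' : ((done ++ [i]).countP (fun x => g.getD x [] == []) : Int)
            = (done.countP (fun x => g.getD x [] == []) : Int) + 1 := by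
          rw [List.countP_append]
          simp [hiso]
        refine ihr (done ++ [i]) hsplit' vis (groups ++ [1]) hvn hcl hniso
          (by
            intro x hx hne
            rcases List.mem_append.1 hx with hx | hx
            · exact hcov x hx hne
            · rw [List.mem_singleton.1 hx] at hne; exact absurd hiso hne)
          (by
            rw [List.sum_append, hsum, hcnt']
            simp only [List.sum_cons, List.sum_nil]
            ring)
          (by
            rw [List.map_append, List.sum_append, hsq, hcnt']
            simp only [List.map_cons, List.map_nil, List.sum_cons, List.sum_nil]
            ring)
      · rw [if_neg hiso]
        -- the DFS branch
        have hfuel : uvV n (vis.insert i true) + 1 ≤ n.toNat + 1 := by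
          have h1 : uvV n (vis.insert i true) + 1 = uvV n vis := (uvV_insert hin hvif).symm
          have h2 : uvV n vis ≤ (nodesOf n).length := List.countP_le_length
          have h3 : (nodesOf n).length = n.toNat := by
            simp [nodesOf, PySem.List.length_pyRange_one]
          omega
        have hvn2 : ∀ x, (vis.insert i true).getD x false = true → x ∈ nodesOf n := by
          intro x hx
          rw [getD_insert_true] at hx
          by_cases hxc : x = i
          · exact hxc ▸ hin
          · rw [if_neg hxc] at hx; exact hvn x hx
        have hiV : (vis.insert i true).getD i false = true := by
          rw [getD_insert_true, if_pos rfl]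
        obtain ⟨hre, hnb, huv⟩ := dfs_spec n E g hadj hE (n.toNat + 1) i
          (vis.insert i true) [] hiV hvn2 hfuel
        set r := dfsA (n.toNat + 1) i g (vis.insert i true) [] with hr
        -- characterisation of the visited set after the dfs call
        have hchar : ∀ x, r.2.getD x false = true ↔
            (vis.getD x false = true ∨ (x ∈ nodesOf n ∧ conn E i x)) := by
          intro x
          constructor
          · intro hx
            rcases hre.sound x hx with hx1 | ⟨hconn, hxn⟩
            · rw [getD_insert_true] at hx1
              by_cases hxc : x = i
              · exact Or.inr ⟨hxc ▸ hin, hxc ▸ conn_refl E i⟩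
              · rw [if_neg hxc] at hx1; exact Or.inl hx1
            · exact Or.inr ⟨hxn, hconn⟩
          · rintro (hx | ⟨hxn, hconn⟩)
            · exact hre.mono x (by rw [getD_insert_true]; split <;> [rfl; exact hx])
            · revert hxn
              induction hconn with
              | refl => intro _; exact hre.mono i hiV
              | @tail b c hmid step ihc =>
                intro _
                have hbn : b ∈ nodesOf n := (er_nodes hE step).1
                have hSb : r.2.getD b false = true := ihc hbn
                by_cases hvb : vis.getD b false = true
                · refine hre.mono c ?_
                  rw [getD_insert_true]
                  split
                  · rfl
                  · exact hcl b c hvb step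
                · by_cases hbi : b = i
                  · exact hnb c (hbi ▸ step)
                  · have hb2f : (vis.insert i true).getD b false = false := by
                      rw [getD_insert_true, if_neg hbi]
                      cases h : vis.getD b false
                      · rfl
                      · exact absurd h hvb
                    exact hre.complete b hSb hb2f c step
        have hdisj : ∀ x ∈ nodesOf n,
            ¬(vis.getD x false = true ∧ (lab.getD x 0 == lab.getD i 0) = true) := by
          rintro x hxn ⟨hxv, hxl⟩
          have hconn : conn E x i := (heqv x hxn i hin).1 (by simpa using hxl)
          exact hvi (vis_closed_conn hcl hxv hconn)
        have hpoint : ∀ x ∈ nodesOf n, r.2.getD x false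
            = (vis.getD x false || (lab.getD x 0 == lab.getD i 0)) := by
          intro x hxn
          rw [Bool.eq_iff_iff, Bool.or_eq_true, beq_iff_eq, hchar x]
          constructor
          · rintro (h | ⟨_, hconn⟩)
            · exact Or.inl h
            · exact Or.inr ((heqv x hxn i hin).2 (conn_symm E hconn))
          · rintro (h | hl)
            · exact Or.inl h
            · exact Or.inr ⟨hxn, conn_symm E ((heqv x hxn i hin).1 hl)⟩
        have hcq : cntV n r.2 = cntV n vis
            + (nodesOf n).countP (fun w => lab.getD w 0 == lab.getD i 0) := by
          unfold cntV
          rw [countP_congr_mem (fun y hy => hpoint y hy), countP_or_disjoint hdisj]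
        have hclsi : clsSize n lab i
            = ((nodesOf n).countP (fun w => lab.getD w 0 == lab.getD i 0) : Int) := rfl
        have hlen : (r.1.length : Int) = clsSize n lab i := by
          have hl := hre.len
          have hc2 : cntV n (vis.insert i true) = cntV n vis + 1 := cntV_insert hin hvif
          rw [hclsi]
          simp only [List.length_nil] at hl
          have : r.1.length = (nodesOf n).countP (fun w => lab.getD w 0 == lab.getD i 0) := by
            omega
          rw [this]
        have hcnt' : ((done ++ [i]).countP (fun x => g.getD x [] == []) : Int)
            = (done.countP (fun x => g.getD x [] == []) : Int) := by
          rw [List.countP_append]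
          simp [hiso]
        refine ihr (done ++ [i]) hsplit' r.2 (groups ++ [((r.1.length : Int))])
          hre.visNodes ?_ ?_ ?_ ?_ ?_
        · -- closure of the new visited set
          intro x y hx hxy
          rcases (hchar x).1 hx with hxv | ⟨hxn, hconn⟩
          · exact (hchar y).2 (Or.inl (hcl x y hxv hxy))
          · exact (hchar y).2 (Or.inr ⟨(er_nodes hE hxy).2, hconn.tail hxy⟩)
        · -- visited nodes have neighbours
          intro x hx
          rcases (hchar x).1 hx with hxv | ⟨hxn, hconn⟩
          · exact hniso x hxv
          · by_cases hxi : x = i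
            · exact hxi ▸ hiso
            · obtain ⟨z, hz⟩ := conn_mem_of_ne hconn hxi
              exact List.ne_nil_of_mem ((hadj x z).2 hz)
        · -- processed nodes with neighbours are visited
          intro x hx _
          rcases List.mem_append.1 hx with hx | hx
          · by_cases hvx : vis.getD x false = true
            · exact (hchar x).2 (Or.inl hvx)
            · rename_i hne
              exact (hchar x).2 (Or.inl (hcov x hx hne))
          · rw [List.mem_singleton.1 hx]
            exact (hchar i).2 (Or.inr ⟨hin, conn_refl E i⟩)
        · -- running sum
          rw [List.sum_append, hsum, hcnt', hlen, hclsi]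
          unfold cntV at hcq ⊢
          rw [hcq]
          simp only [List.sum_cons, List.sum_nil]
          push_cast
          ring
        · -- running sum of squares
          have hfilter : (nodesOf n).filter (fun x => r.2.getD x false)
              = (nodesOf n).filter (fun x => vis.getD x false || (lab.getD x 0 == lab.getD i 0)) :=
            List.filter_congr hpoint
          have hsplitsum :
              (((nodesOf n).filter (fun x => r.2.getD x false)).map (fun x => clsSize n lab x)).sum
              = (((nodesOf n).filter (fun x => vis.getD x false)).map (fun x => clsSize n lab x)).sum
                + clsSize n lab i * clsSize n lab i := by
            rw [hfilter, sum_filter_or_disjoint _ hdisj]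
            congr 1
            have hconst : ∀ y ∈ nodesOf n, (lab.getD y 0 == lab.getD i 0) = true →
                clsSize n lab y = clsSize n lab i := by
              intro y _ hy
              unfold clsSize
              rw [beq_iff_eq.1 hy]
            rw [sum_map_filter_const hconst, hclsi]
          rw [List.map_append, List.sum_append, hsq, hcnt', hsplitsum]
          simp only [List.map_cons, List.map_nil, List.sum_cons, List.sum_nil, hlen]
          ring

-- ---------- final assembly ----------

lemma gpw_foldl : ∀ (l : List Int) (t r : Int),
    (l.foldl (fun (tr : Int × Int) size => (tr.1 + size, tr.2 + size * tr.1)) (t, r)).1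
      = t + l.sum ∧
    2 * (l.foldl (fun (tr : Int × Int) size => (tr.1 + size, tr.2 + size * tr.1)) (t, r)).2
      = 2 * r + (t + l.sum) * (t + l.sum) - t * t - (l.map (fun s => s * s)).sum := by
  intro l
  induction l with
  | nil => intro t r; constructor <;> simp
  | cons s l ih =>
    intro t r
    rw [List.foldl_cons]
    obtain ⟨h1, h2⟩ := ih (t + s) (r + s * t)
    constructor
    · rw [h1, List.sum_cons]; ring
    · rw [h2, List.sum_cons, List.map_cons, List.sum_cons]; ring

lemma fstP_sndP_eq {p : List Int} (h : 2 ≤ p.length) :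
    fstP p = p.getD 0 0 ∧ sndP p = p.getD 1 0 := by
  match p with
  | [] => simp at h
  | [a] => simp at h
  | a :: b :: t =>
    constructor
    · show (PySem.List.pyGet? (a :: b :: t) 0).getD 0 = a
      have hpos : (0 : Int) ≤ (t.length : Int) + 1 := by positivity
      simp [PySem.List.pyGet?, PySem.List.pyIdx?, hpos]
    · show (PySem.List.pyGet? (a :: b :: t) 1).getD 0 = b
      simp [PySem.List.pyGet?, PySem.List.pyIdx?]

-- ===== VERDICT (by name: the statement is the Claim_ definition above) =====
theorem journeyToMoon_spec : Claim_equal_journeyToMoon := by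
  unfold Claim_equal_journeyToMoon
  intro n astronaut _ hpre
  unfold Spec_journeyToMoon
  have hends : ∀ p ∈ astronaut, fstP p ∈ nodesOf n ∧ sndP p ∈ nodesOf n := by
    intro p hp
    obtain ⟨hlen, h0a, h0b, h1a, h1b⟩ := hpre p hp
    obtain ⟨hf, hs⟩ := fstP_sndP_eq hlen
    exact ⟨by rw [hf, mem_nodesOf]; exact ⟨h0a, h0b⟩,
      by rw [hs, mem_nodesOf]; exact ⟨h1a, h1b⟩⟩
  have hE : ∀ e ∈ edgesOf astronaut, e.1 ∈ nodesOf n ∧ e.2 ∈ nodesOf n := by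
    intro e he
    rcases List.mem_map.1 he with ⟨p, hp, rfl⟩
    exact ⟨(hends p hp).1, (hends p hp).2⟩
  have hinv : BInv n (edgesOf astronaut) (astronaut.foldl bStep (labInit n, memInit n)) := by
    have := bFold_inv n astronaut [] (labInit n, memInit n) (bInit_inv n) hends
    simpa using this
  obtain ⟨hkg, hadj⟩ := buildGraph_spec n (edgesOf astronaut) hE
  have hnodk : (buildGraph n (edgesOf astronaut)).keys.Nodup := by
    rw [hkg]; exact nodup_nodes n
  have hbuild : astronaut.foldl
      (fun g p =>
        ((g.modify ((PySem.List.pyGet? p 0).getD 0) [] (fun l => l ++ [(PySem.List.pyGet? p 1).getD 0])).modify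
          ((PySem.List.pyGet? p 1).getD 0) [] (fun l => l ++ [(PySem.List.pyGet? p 0).getD 0]))) (graph0 n)
      = buildGraph n (edgesOf astronaut) := by
    unfold buildGraph edgesOf
    rw [List.foldl_map]
    rfl
  have hitems : (buildGraph n (edgesOf astronaut)).items
      = (nodesOf n).map (fun i => (i, (buildGraph n (edgesOf astronaut)).getD i [])) := by
    rw [PySem.Dict.items_eq_map_keys _ hnodk [], hkg]
  have hAval : journeyToMoon n astronaut
      = getPossibleWaysA (((nodesOf n).foldl
          (fun (st : PySem.Dict Int Bool × List Int) i =>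
            if st.1.getD i false = true then st
            else if (buildGraph n (edgesOf astronaut)).getD i [] = [] then (st.1, st.2 ++ [(1 : Int)])
            else
              ((dfsA (n.toNat + 1) i (buildGraph n (edgesOf astronaut)) (st.1.insert i true) []).2,
                st.2 ++ [(((dfsA (n.toNat + 1) i (buildGraph n (edgesOf astronaut)) (st.1.insert i true) []).1.length : Int))]))
          (visited0 n, [])).2) := by
    have hgv : (PySem.List.pyRange 0 n 1).foldl
        (fun (gv : PySem.Dict Int (List Int) × PySem.Dict Int Bool) i =>
          (gv.1.insert i [], gv.2.insert i false)) (PySem.Dict.empty, PySem.Dict.empty)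
        = (graph0 n, visited0 n) :=
      PySem.List.foldl_prod_mk (fun (d : PySem.Dict Int (List Int)) i => d.insert i [])
        (fun (d : PySem.Dict Int Bool) i => d.insert i false)
        (PySem.List.pyRange 0 n 1) PySem.Dict.empty PySem.Dict.empty
    unfold journeyToMoon
    dsimp only
    rw [hgv]
    dsimp only
    rw [hbuild, hitems, List.foldl_map]
  have hvis0 : ∀ x : Int, (visited0 n).getD x false = false := visited0_getD n
  have hcnt0 : cntV n (visited0 n) = 0 := by
    unfold cntV
    rw [countP_congr_mem (fun y _ => hvis0 y)]
    simp
  have hfil0 : (nodesOf n).filter (fun x => (visited0 n).getD x false) = [] := by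
    rw [List.filter_congr (fun y _ => hvis0 y)]
    exact List.filter_false _
  obtain ⟨hsumF, hsqF⟩ := aLoop n (edgesOf astronaut) (buildGraph n (edgesOf astronaut))
    (astronaut.foldl bStep (labInit n, memInit n)).1 hadj hE hinv.eqv
    (nodesOf n) [] (by simp) (visited0 n) []
    (fun x hx => absurd hx (by rw [hvis0 x]; exact Bool.false_ne_true))
    (fun x y hx _ => absurd hx (by rw [hvis0 x]; exact Bool.false_ne_true))
    (fun x hx => absurd hx (by rw [hvis0 x]; exact Bool.false_ne_true))
    (fun x hx _ => absurd hx (List.not_mem_nil))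
    (by rw [hcnt0]; simp)
    (by rw [hfil0]; simp)
  rw [hAval, alt_value n astronaut hinv]
  obtain ⟨_, h2R⟩ := gpw_foldl (((nodesOf n).foldl
      (fun (st : PySem.Dict Int Bool × List Int) i =>
        if st.1.getD i false = true then st
        else if (buildGraph n (edgesOf astronaut)).getD i [] = [] then (st.1, st.2 ++ [(1 : Int)])
        else
          ((dfsA (n.toNat + 1) i (buildGraph n (edgesOf astronaut)) (st.1.insert i true) []).2,
            st.2 ++ [(((dfsA (n.toNat + 1) i (buildGraph n (edgesOf astronaut)) (st.1.insert i true) []).1.length : Int))]))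
      (visited0 n, [])).2) 0 0
  rw [hsumF, hsqF] at h2R
  unfold getPossibleWaysA
  rw [show ((nodesOf n).length : Int) * ((nodesOf n).length : Int)
      - ((nodesOf n).map (fun x => clsSize n (astronaut.foldl bStep (labInit n, memInit n)).1 x)).sum
      = 2 * (((((nodesOf n).foldl
          (fun (st : PySem.Dict Int Bool × List Int) i =>
            if st.1.getD i false = true then st
            else if (buildGraph n (edgesOf astronaut)).getD i [] = [] then (st.1, st.2 ++ [(1 : Int)])
            else
              ((dfsA (n.toNat + 1) i (buildGraph n (edgesOf astronaut)) (st.1.insert i true) []).2,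
                st.2 ++ [(((dfsA (n.toNat + 1) i (buildGraph n (edgesOf astronaut)) (st.1.insert i true) []).1.length : Int))]))
          (visited0 n, [])).2.foldl
            (fun (tr : Int × Int) size => (tr.1 + size, tr.2 + size * tr.1)) (0, 0)).2))
    from by rw [h2R]; ring]
  exact (Int.mul_fdiv_cancel_left (a := 2) _ (by norm_num)).symm
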